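-- pv_equiv track=rewrite | github.com/BobbyBlanco400/nexus-cos | services/router.py | route_ai_request
-- ===== SOURCE A (Python) =====
-- from typing import Dict, Any
--
-- AI_SERVICES = {
--     'puabo_api_ai_hf': {
--         'name': 'PUABO API/AI-HF Hybrid',
--         'url': 'http://localhost:3401',
--         'capabilities': [
--             'text-generation',
--             'text-classification',
--             'question-answering',
--             'summarization',
--             'translation'
--         ],
--         'enabled': True
--     }
-- }
--
-- def route_ai_request(task_type: str) -> Dict[str, Any]:
--     """
--     Route AI request to appropriate service based on task type
--
--     Args:
--         task_type: Type of AI task (e.g., 'text-generation', 'summarization')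
--
--     Returns:
--         Service configuration for handling the request
--     """
--     for service_id, service_config in AI_SERVICES.items():
--         if service_config['enabled'] and task_type in service_config['capabilities']:
--             return {
--                 'service': service_id,
--                 'url': service_config['url'],
--                 'name': service_config['name']
--             }
--
--     return {
--         'error': f'No service available for task type: {task_type}'
--     }
-- ===== SOURCE B (Python) =====
-- from typing import Dict, Any
--
-- AI_SERVICES = {
--     'puabo_api_ai_hf': {
--         'name': 'PUABO API/AI-HF Hybrid',
--         'url': 'http://localhost:3401',
--         'capabilities': [
--             'text-generation',
--             'text-classification',
--             'question-answering',
--             'summarization',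
--             'translation'
--         ],
--         'enabled': True
--     }
-- }
--
-- # Built once at module load: capability -> result dict; setdefault keeps the
-- # FIRST enabled service offering each capability (matches A's first-match order).
-- CAP_TO_SERVICE: Dict[str, Dict[str, Any]] = {}
-- for _sid, _cfg in AI_SERVICES.items():
--     if _cfg['enabled']:
--         for _cap in _cfg['capabilities']:
--             CAP_TO_SERVICE.setdefault(_cap, {
--                 'service': _sid,
--                 'url': _cfg['url'],
--                 'name': _cfg['name']
--             })
--
-- def route_ai_request(task_type: str) -> Dict[str, Any]:
--     hit = CAP_TO_SERVICE.get(task_type)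
--     if hit is not None:
--         return dict(hit)
--     return {'error': f'No service available for task type: {task_type}'}
-- ===== Notes on version B (the rewrite author's own statement) =====
-- stated objective: faster
-- what changed: B precomputes at module load a capability->service table (setdefault keeps the first enabled service per capability), so each call is a single dict lookup instead of a per-call scan over all services and their capability lists.
import Mathlib
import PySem

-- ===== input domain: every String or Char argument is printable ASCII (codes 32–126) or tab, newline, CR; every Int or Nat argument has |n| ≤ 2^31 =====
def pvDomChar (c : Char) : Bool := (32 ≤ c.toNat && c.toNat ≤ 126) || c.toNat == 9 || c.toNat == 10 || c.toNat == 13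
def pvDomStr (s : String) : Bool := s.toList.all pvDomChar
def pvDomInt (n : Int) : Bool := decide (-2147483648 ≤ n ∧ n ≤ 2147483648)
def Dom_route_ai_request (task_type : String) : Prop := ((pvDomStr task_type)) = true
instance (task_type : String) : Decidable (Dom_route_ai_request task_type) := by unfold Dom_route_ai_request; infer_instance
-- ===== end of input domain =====

-- B replaces A's per-call scan over services with a table built once at module load; each call is one lookup (objective: faster, constant-factor).

-- ===== PORT A =====
-- AI_SERVICES: (service_id, name, url, capabilities, enabled), in insertion order
def pvAIServices : List (String × String × String × List String × Bool) :=
  [("puabo_api_ai_hf", "PUABO API/AI-HF Hybrid", "http://localhost:3401",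
    ["text-generation", "text-classification", "question-answering", "summarization", "translation"], true)]

-- the 'for service_id, service_config in AI_SERVICES.items()' loop, with early return
def pvRouteLoop (task_type : String) : List (String × String × String × List String × Bool) → List (String × String)
  | [] => [("error", "No service available for task type: " ++ task_type)]
  | (sid, name, url, caps, enabled) :: rest =>
      if enabled && caps.contains task_type then
        [("service", sid), ("url", url), ("name", name)]
      else pvRouteLoop task_type rest

def route_ai_request (task_type : String) : List (String × String) :=
  pvRouteLoop task_type pvAIServices

-- ===== PORT B =====
-- module-load loop building CAP_TO_SERVICE with setdefault (first enabled service wins)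
def pvCapToService : PySem.Dict String (List (String × String)) :=
  pvAIServices.foldl
    (fun d svc =>
      match svc with
      | (sid, name, url, caps, enabled) =>
        if enabled then
          caps.foldl (fun d cap =>
            d.setdefault cap [("service", sid), ("url", url), ("name", name)]) d
        else d)
    PySem.Dict.empty

def route_ai_request_alt (task_type : String) : List (String × String) :=
  match pvCapToService.get? task_type with
  | some hit => hit
  | none => [("error", "No service available for task type: " ++ task_type)]

-- ===== PRECONDITION & SPEC =====
def Spec_route_ai_request (task_type : String) (out : List (String × String)) : Prop := out = route_ai_request_alt task_type
instance (task_type : String) (out : List (String × String)) : Decidable (Spec_route_ai_request task_type out) := by unfold Spec_route_ai_request; infer_instance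

-- ===== CLAIM (what is proved, stated in full; the proofs are below) =====
def Claim_equal_route_ai_request : Prop := ∀ (task_type : String), Dom_route_ai_request task_type → Spec_route_ai_request task_type (route_ai_request task_type)

-- ===== LEMMAS AND PROOFS =====
-- the module-load fold evaluates to a literal dict
theorem pvCapToService_eval : pvCapToService = PySem.Dict.mk
    [("text-generation",
      [("service", "puabo_api_ai_hf"), ("url", "http://localhost:3401"), ("name", "PUABO API/AI-HF Hybrid")]),
     ("text-classification",
      [("service", "puabo_api_ai_hf"), ("url", "http://localhost:3401"), ("name", "PUABO API/AI-HF Hybrid")]),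
     ("question-answering",
      [("service", "puabo_api_ai_hf"), ("url", "http://localhost:3401"), ("name", "PUABO API/AI-HF Hybrid")]),
     ("summarization",
      [("service", "puabo_api_ai_hf"), ("url", "http://localhost:3401"), ("name", "PUABO API/AI-HF Hybrid")]),
     ("translation",
      [("service", "puabo_api_ai_hf"), ("url", "http://localhost:3401"), ("name", "PUABO API/AI-HF Hybrid")])] := by
  decide

-- ===== VERDICT (by name: the statement is the Claim_ definition above) =====
theorem route_ai_request_spec : Claim_equal_route_ai_request := by
  intro t _
  unfold Spec_route_ai_request route_ai_request route_ai_request_alt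
  rw [pvCapToService_eval]
  by_cases h1 : t = "text-generation" <;>
  by_cases h2 : t = "text-classification" <;>
  by_cases h3 : t = "question-answering" <;>
  by_cases h4 : t = "summarization" <;>
  by_cases h5 : t = "translation" <;>
  simp [pvRouteLoop, pvAIServices, PySem.Dict.get?_mk_cons, h1, h2, h3, h4, h5] <;>
  simp_all [PySem.Dict.get?, eq_comm]
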